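-- pv_equiv track=rewrite | github.com/StefanoBlando/pokenexus | app.py | calculate_offensive_coverage
-- ===== SOURCE A (Python) =====
-- TYPE_CHART = {
--     "Normal":   {"Rock": 0.5, "Ghost": 0, "Steel": 0.5}, "Fire": {"Fire": 0.5, "Water": 0.5, "Grass": 2, "Ice": 2, "Bug": 2, "Rock": 0.5, "Dragon": 0.5, "Steel": 2},
--     "Water":    {"Fire": 2, "Water": 0.5, "Grass": 0.5, "Ground": 2, "Rock": 2, "Dragon": 0.5}, "Electric": {"Water": 2, "Electric": 0.5, "Grass": 0.5, "Ground": 0, "Flying": 2, "Dragon": 0.5},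
--     "Grass":    {"Fire": 0.5, "Water": 2, "Grass": 0.5, "Poison": 0.5, "Ground": 2, "Flying": 0.5, "Bug": 0.5, "Rock": 2, "Dragon": 0.5, "Steel": 0.5},
--     "Ice":      {"Fire": 0.5, "Water": 0.5, "Grass": 2, "Ice": 0.5, "Ground": 2, "Flying": 2, "Dragon": 2, "Steel": 0.5},
--     "Fighting": {"Normal": 2, "Ice": 2, "Poison": 0.5, "Flying": 0.5, "Psychic": 0.5, "Bug": 0.5, "Rock": 2, "Ghost": 0, "Dark": 2, "Steel": 2, "Fairy": 0.5},
--     "Poison":   {"Grass": 2, "Poison": 0.5, "Ground": 0.5, "Rock": 0.5, "Ghost": 0.5, "Steel": 0, "Fairy": 2},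
--     "Ground":   {"Fire": 2, "Electric": 2, "Grass": 0.5, "Poison": 2, "Flying": 0, "Bug": 0.5, "Rock": 2, "Steel": 2},
--     "Flying":   {"Electric": 0.5, "Grass": 2, "Fighting": 2, "Bug": 2, "Rock": 0.5, "Steel": 0.5},
--     "Psychic":  {"Fighting": 2, "Poison": 2, "Psychic": 0.5, "Dark": 0, "Steel": 0.5},
--     "Bug":      {"Fire": 0.5, "Grass": 2, "Fighting": 0.5, "Poison": 0.5, "Flying": 0.5, "Psychic": 2, "Ghost": 0.5, "Dark": 2, "Steel": 0.5, "Fairy": 0.5},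
--     "Rock":     {"Fire": 2, "Ice": 2, "Fighting": 0.5, "Ground": 0.5, "Flying": 2, "Bug": 2, "Steel": 0.5},
--     "Ghost":    {"Normal": 0, "Psychic": 2, "Ghost": 2, "Dark": 0.5}, "Dragon": {"Dragon": 2, "Steel": 0.5, "Fairy": 0},
--     "Dark":     {"Fighting": 0.5, "Psychic": 2, "Ghost": 2, "Dark": 0.5, "Fairy": 0.5}, "Steel": {"Fire": 0.5, "Water": 0.5, "Electric": 0.5, "Ice": 2, "Rock": 2, "Steel": 0.5, "Fairy": 2},
--     "Fairy":    {"Fire": 0.5, "Fighting": 2, "Poison": 0.5, "Dragon": 2, "Dark": 2, "Steel": 0.5}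
-- }
--
-- def calculate_offensive_coverage(team_data):
--     hit_types = {t: 0 for t in TYPE_CHART.keys()}
--     for p in team_data:
--         for atk_type in p['types']:
--             targets = TYPE_CHART.get(atk_type, {})
--             for def_type, eff in targets.items():
--                 if eff >= 2.0: hit_types[def_type] += 1
--     return hit_types
-- ===== SOURCE B (Python) =====
-- # Hardcoded once: attack type -> defending types it hits supereffectively
-- # (exactly the eff >= 2.0 entries of TYPE_CHART, in TYPE_CHART's key/row order).
-- SUPER_EFFECTIVE = {
--     "Normal":   [],
--     "Fire":     ["Grass", "Ice", "Bug", "Steel"],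
--     "Water":    ["Fire", "Ground", "Rock"],
--     "Electric": ["Water", "Flying"],
--     "Grass":    ["Water", "Ground", "Rock"],
--     "Ice":      ["Grass", "Ground", "Flying", "Dragon"],
--     "Fighting": ["Normal", "Ice", "Rock", "Dark", "Steel"],
--     "Poison":   ["Grass", "Fairy"],
--     "Ground":   ["Fire", "Electric", "Poison", "Rock", "Steel"],
--     "Flying":   ["Grass", "Fighting", "Bug"],
--     "Psychic":  ["Fighting", "Poison"],
--     "Bug":      ["Grass", "Psychic", "Dark"],
--     "Rock":     ["Fire", "Ice", "Flying", "Bug"],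
--     "Ghost":    ["Psychic", "Ghost"],
--     "Dragon":   ["Dragon"],
--     "Dark":     ["Psychic", "Ghost"],
--     "Steel":    ["Ice", "Rock", "Fairy"],
--     "Fairy":    ["Fighting", "Dragon", "Dark"],
-- }
-- ALL_TYPES = list(SUPER_EFFECTIVE)
--
-- def calculate_offensive_coverage(team_data):
--     # Aggregate: frequency of each attack type across the whole team.
--     counts = {}
--     for p in team_data:
--         for t in p['types']:
--             counts[t] = counts.get(t, 0) + 1
--     # For each defending type, sum the counts of the attack types that hit it.
--     return {d: sum(c for atk, c in counts.items()
--                    if d in SUPER_EFFECTIVE.get(atk, []))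
--             for d in ALL_TYPES}
-- ===== Notes on version B (the rewrite author's own statement) =====
-- stated objective: alternative
-- what changed: B counts each attack type's frequency across the team once and then builds the result as a comprehension over defending types, summing the counts of attack types whose hardcoded supereffective-target list contains that defender, instead of A's per-occurrence triple loop over the raw TYPE_CHART incrementing a mutable tally.
import Mathlib
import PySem

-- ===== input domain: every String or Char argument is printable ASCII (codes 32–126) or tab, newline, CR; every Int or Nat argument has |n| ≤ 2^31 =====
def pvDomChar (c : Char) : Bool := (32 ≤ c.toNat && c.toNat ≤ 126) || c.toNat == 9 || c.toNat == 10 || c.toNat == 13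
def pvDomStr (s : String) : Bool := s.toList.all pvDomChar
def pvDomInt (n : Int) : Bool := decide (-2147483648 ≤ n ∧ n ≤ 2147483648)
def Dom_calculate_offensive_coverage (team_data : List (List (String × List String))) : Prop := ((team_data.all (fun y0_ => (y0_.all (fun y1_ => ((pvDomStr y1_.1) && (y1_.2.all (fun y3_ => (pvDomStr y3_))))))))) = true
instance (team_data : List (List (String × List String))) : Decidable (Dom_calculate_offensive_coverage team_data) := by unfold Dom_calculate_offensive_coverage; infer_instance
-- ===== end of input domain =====

-- B counts each attack type's team-wide frequency once and builds the result as a comprehension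
-- over defending types, summing the counts of attack types whose hardcoded supereffective-target
-- list contains that defender (objective: alternative decomposition, same exact result).
-- Effectiveness values in TYPE_CHART are the Python floats scaled by 2 (all are exact multiples
-- of 0.5), so the test `eff >= 2.0` is ported as `4 ≤ eff2` — exact.

-- ===== PORT A =====
def typeChart : List (String × List (String × Int)) := [
  ("Normal",   [("Rock", 1), ("Ghost", 0), ("Steel", 1)]),
  ("Fire",     [("Fire", 1), ("Water", 1), ("Grass", 4), ("Ice", 4), ("Bug", 4), ("Rock", 1), ("Dragon", 1), ("Steel", 4)]),
  ("Water",    [("Fire", 4), ("Water", 1), ("Grass", 1), ("Ground", 4), ("Rock", 4), ("Dragon", 1)]),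
  ("Electric", [("Water", 4), ("Electric", 1), ("Grass", 1), ("Ground", 0), ("Flying", 4), ("Dragon", 1)]),
  ("Grass",    [("Fire", 1), ("Water", 4), ("Grass", 1), ("Poison", 1), ("Ground", 4), ("Flying", 1), ("Bug", 1), ("Rock", 4), ("Dragon", 1), ("Steel", 1)]),
  ("Ice",      [("Fire", 1), ("Water", 1), ("Grass", 4), ("Ice", 1), ("Ground", 4), ("Flying", 4), ("Dragon", 4), ("Steel", 1)]),
  ("Fighting", [("Normal", 4), ("Ice", 4), ("Poison", 1), ("Flying", 1), ("Psychic", 1), ("Bug", 1), ("Rock", 4), ("Ghost", 0), ("Dark", 4), ("Steel", 4), ("Fairy", 1)]),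
  ("Poison",   [("Grass", 4), ("Poison", 1), ("Ground", 1), ("Rock", 1), ("Ghost", 1), ("Steel", 0), ("Fairy", 4)]),
  ("Ground",   [("Fire", 4), ("Electric", 4), ("Grass", 1), ("Poison", 4), ("Flying", 0), ("Bug", 1), ("Rock", 4), ("Steel", 4)]),
  ("Flying",   [("Electric", 1), ("Grass", 4), ("Fighting", 4), ("Bug", 4), ("Rock", 1), ("Steel", 1)]),
  ("Psychic",  [("Fighting", 4), ("Poison", 4), ("Psychic", 1), ("Dark", 0), ("Steel", 1)]),
  ("Bug",      [("Fire", 1), ("Grass", 4), ("Fighting", 1), ("Poison", 1), ("Flying", 1), ("Psychic", 4), ("Ghost", 1), ("Dark", 4), ("Steel", 1), ("Fairy", 1)]),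
  ("Rock",     [("Fire", 4), ("Ice", 4), ("Fighting", 1), ("Ground", 1), ("Flying", 4), ("Bug", 4), ("Steel", 1)]),
  ("Ghost",    [("Normal", 0), ("Psychic", 4), ("Ghost", 4), ("Dark", 1)]),
  ("Dragon",   [("Dragon", 4), ("Steel", 1), ("Fairy", 0)]),
  ("Dark",     [("Fighting", 1), ("Psychic", 4), ("Ghost", 4), ("Dark", 1), ("Fairy", 1)]),
  ("Steel",    [("Fire", 1), ("Water", 1), ("Electric", 1), ("Ice", 4), ("Rock", 4), ("Steel", 1), ("Fairy", 4)]),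
  ("Fairy",    [("Fire", 1), ("Fighting", 4), ("Poison", 1), ("Dragon", 4), ("Dark", 4), ("Steel", 1)])]

-- p['types'] raises KeyError when the key is missing (excluded by Pre_); getD makes the port total.
def calculate_offensive_coverage (team_data : List (List (String × List String))) : List (String × Int) :=
  let hit0 : PySem.Dict String Int := PySem.Dict.ofList (typeChart.map (fun t => (t.1, 0)))
  (team_data.foldl (fun d p =>
      ((PySem.Dict.mk p).getD "types" []).foldl (fun d atk =>
          ((PySem.Dict.mk typeChart).getD atk []).foldl (fun d q =>
              if 4 ≤ q.2 then d.modify q.1 0 (· + 1) else d) d) d) hit0).items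

-- ===== PORT B =====
-- SUPER_EFFECTIVE: hardcoded attack type -> defending types hit supereffectively.
def superChart : List (String × List String) := [
  ("Normal",   []),
  ("Fire",     ["Grass", "Ice", "Bug", "Steel"]),
  ("Water",    ["Fire", "Ground", "Rock"]),
  ("Electric", ["Water", "Flying"]),
  ("Grass",    ["Water", "Ground", "Rock"]),
  ("Ice",      ["Grass", "Ground", "Flying", "Dragon"]),
  ("Fighting", ["Normal", "Ice", "Rock", "Dark", "Steel"]),
  ("Poison",   ["Grass", "Fairy"]),
  ("Ground",   ["Fire", "Electric", "Poison", "Rock", "Steel"]),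
  ("Flying",   ["Grass", "Fighting", "Bug"]),
  ("Psychic",  ["Fighting", "Poison"]),
  ("Bug",      ["Grass", "Psychic", "Dark"]),
  ("Rock",     ["Fire", "Ice", "Flying", "Bug"]),
  ("Ghost",    ["Psychic", "Ghost"]),
  ("Dragon",   ["Dragon"]),
  ("Dark",     ["Psychic", "Ghost"]),
  ("Steel",    ["Ice", "Rock", "Fairy"]),
  ("Fairy",    ["Fighting", "Dragon", "Dark"])]

-- ALL_TYPES = list(SUPER_EFFECTIVE)
def allTypes : List String := superChart.map (·.1)

def calculate_offensive_coverage_alt (team_data : List (List (String × List String))) : List (String × Int) :=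
  let counts : PySem.Dict String Int :=
    team_data.foldl (fun d p =>
        ((PySem.Dict.mk p).getD "types" []).foldl (fun d t => d.insert t (d.getD t 0 + 1)) d)
      PySem.Dict.empty
  allTypes.map (fun dt =>
    (dt, (counts.items.map (fun ac =>
            if ((PySem.Dict.mk superChart).getD ac.1 []).contains dt then ac.2 else 0)).sum))

-- ===== PRECONDITION & SPEC =====
-- Pre_ excludes exactly the inputs on which the Python A raises KeyError: a team member without a 'types' key.
def Pre_calculate_offensive_coverage (team_data : List (List (String × List String))) : Prop :=
  ∀ p ∈ team_data, "types" ∈ p.map (·.1)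
instance (team_data : List (List (String × List String))) : Decidable (Pre_calculate_offensive_coverage team_data) := by unfold Pre_calculate_offensive_coverage; infer_instance

def pvWitness_calculate_offensive_coverage : (List (List (String × List String))) :=
  [[("types", ["Fire", "Water"])], [("types", ["Fire"])]]

def Spec_calculate_offensive_coverage (team_data : List (List (String × List String))) (out : List (String × Int)) : Prop := out = calculate_offensive_coverage_alt team_data
instance (team_data : List (List (String × List String))) (out : List (String × Int)) : Decidable (Spec_calculate_offensive_coverage team_data out) := by unfold Spec_calculate_offensive_coverage; infer_instance

-- ===== CLAIM (what is proved, stated in full; the proofs are below) =====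
def Claim_equal_calculate_offensive_coverage : Prop := ∀ (team_data : List (List (String × List String))), Dom_calculate_offensive_coverage team_data → Pre_calculate_offensive_coverage team_data → Spec_calculate_offensive_coverage team_data (calculate_offensive_coverage team_data)

-- ===== LEMMAS AND PROOFS =====

-- the flattened list of attack types of the whole team
def pvFlat (team_data : List (List (String × List String))) : List String :=
  team_data.flatMap (fun p => (PySem.Dict.mk p).getD "types" [])

-- supereffective target list of an attack type, as B looks it up
def pvSup (atk : String) : List String := (PySem.Dict.mk superChart).getD atk []

-- lookup in a key-preserving mapped association list
theorem get?_mk_map_snd {α β : Type} (g : α → β) :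
    ∀ (ps : List (String × α)) (k : String),
      (PySem.Dict.mk (ps.map (fun t => (t.1, g t.2)))).get? k = ((PySem.Dict.mk ps).get? k).map g := by
  intro ps
  induction ps with
  | nil => intro k; rfl
  | cons h t ih =>
      obtain ⟨k1, v1⟩ := h
      intro k
      simp only [List.map_cons]
      rw [PySem.Dict.get?_mk_cons, PySem.Dict.get?_mk_cons]
      by_cases hk : k1 == k
      · simp [hk]
      · simp [hk, ih k]

-- a successful raw-assoc-list lookup returns one of the stored values
theorem get?_mk_mem_values {α : Type} :
    ∀ (ps : List (String × α)) (k : String) (v : α),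
      (PySem.Dict.mk ps).get? k = some v → v ∈ ps.map (·.2) := by
  intro ps
  induction ps with
  | nil => intro k v h; simp [PySem.Dict.get?] at h
  | cons h t ih =>
      obtain ⟨k1, v1⟩ := h
      intro k v hv
      rw [PySem.Dict.get?_mk_cons] at hv
      by_cases hk : k1 == k
      · simp [hk] at hv; simp [hv.symm]
      · simp [hk] at hv
        exact List.mem_cons_of_mem _ (ih k v hv)

-- the hardcoded superChart is exactly TYPE_CHART filtered to eff >= 2.0 and projected to keys
theorem superChart_eq :
    superChart = typeChart.map (fun t => (t.1, (t.2.filter (fun q => 4 ≤ q.2)).map (·.1))) := by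
  decide

-- pvSup is the filtered/mapped chart row
theorem pvSup_eq (atk : String) :
    pvSup atk = (((PySem.Dict.mk typeChart).getD atk []).filter (fun q => 4 ≤ q.2)).map (·.1) := by
  unfold pvSup
  rw [superChart_eq, PySem.Dict.getD_eq_get?_getD, PySem.Dict.getD_eq_get?_getD,
      get?_mk_map_snd (fun l => (l.filter (fun q : String × Int => 4 ≤ q.2)).map (·.1)) typeChart atk]
  cases (PySem.Dict.mk typeChart).get? atk <;> simp

-- every supereffective defending type in the chart is itself a chart key (checked on the literal)
theorem sup_sub_keys (atk : String) : ∀ k ∈ pvSup atk, k ∈ typeChart.map (·.1) := by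
  intro k hk
  rw [pvSup_eq] at hk
  rw [PySem.Dict.getD_eq_get?_getD] at hk
  cases hg : (PySem.Dict.mk typeChart).get? atk with
  | none => rw [hg] at hk; simp at hk
  | some v =>
      rw [hg] at hk
      have hv : v ∈ typeChart.map (·.2) := get?_mk_mem_values typeChart atk v hg
      have : ∀ v ∈ typeChart.map (·.2), ∀ k ∈ (v.filter (fun q : String × Int => 4 ≤ q.2)).map (·.1), k ∈ typeChart.map (·.1) := by decide
      exact this v hv k hk

-- every supereffective target list has no duplicates (dict keys of a literal row)
theorem pvSup_nodup (atk : String) : (pvSup atk).Nodup := by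
  unfold pvSup
  rw [PySem.Dict.getD_eq_get?_getD]
  cases hg : (PySem.Dict.mk superChart).get? atk with
  | none => simp
  | some v =>
      have hv : v ∈ superChart.map (·.2) := get?_mk_mem_values superChart atk v hg
      have : ∀ v ∈ superChart.map (·.2), v.Nodup := by decide
      simpa using this v hv

-- A's inner target loop, value at a key
theorem foldA_getD (k : String) :
    ∀ (l : List (String × Int)) (d : PySem.Dict String Int),
      (l.foldl (fun d q => if 4 ≤ q.2 then d.modify q.1 0 (· + 1) else d) d).getD k 0
        = d.getD k 0 + (((l.filter (fun q => 4 ≤ q.2)).map (·.1)).count k : Int) := by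
  intro l
  induction l with
  | nil => intro d; simp
  | cons q t ih =>
      intro d
      by_cases hq : 4 ≤ q.2
      · rw [List.foldl_cons, if_pos hq, ih, PySem.Dict.getD_modify]
        simp only [List.filter_cons, hq, decide_true, if_true, List.map_cons, List.count_cons]
        by_cases hk : k = q.1
        · simp [hk]; ring
        · simp [hk]; exact fun h => hk h.symm
      · rw [List.foldl_cons, if_neg hq, ih]
        simp [hq]

-- A's inner target loop preserves the key list when every touched key is present
theorem foldA_keys :
    ∀ (l : List (String × Int)) (d : PySem.Dict String Int),
      (∀ q ∈ l, 4 ≤ q.2 → d.contains q.1 = true) →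
      (l.foldl (fun d q => if 4 ≤ q.2 then d.modify q.1 0 (· + 1) else d) d).keys = d.keys := by
  intro l
  induction l with
  | nil => intro d _; rfl
  | cons q t ih =>
      intro d h
      by_cases hq : 4 ≤ q.2
      · simp only [List.foldl_cons, if_pos hq]
        have hc : d.contains q.1 = true := h q (List.mem_cons_self ..) hq
        have hkeys : (d.modify q.1 0 (· + 1)).keys = d.keys := by
          rw [PySem.Dict.keys_modify, PySem.Dict.keys_insert_of_contains]
          exact hc
        rw [ih _ (fun p hp h4 => by
          rw [PySem.Dict.contains_modify]
          simp [h p (List.mem_cons_of_mem _ hp) h4]), hkeys]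
      · simp only [List.foldl_cons, if_neg hq]
        exact ih _ (fun p hp h4 => h p (List.mem_cons_of_mem _ hp) h4)

-- a nested fold over a list of lists is a fold over the flattened list
theorem foldl_nested {α β γ : Type} (f : γ → β → γ) (g : α → List β) :
    ∀ (l : List α) (i : γ),
      l.foldl (fun a x => (g x).foldl f a) i = (l.flatMap g).foldl f i := by
  intro l
  induction l with
  | nil => intro i; rfl
  | cons x t ih => intro i; simp [List.flatMap_cons, List.foldl_append, ih]

-- Σ over a nodup index list of count·f  =  Σ over the list of f  (aggregate-then-distribute)
theorem sum_ite_single (f : String → Int) (x : String) :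
    ∀ (s : List String), s.Nodup → x ∈ s →
      (s.map (fun a => if a = x then f a else 0)).sum = f x := by
  intro s
  induction s with
  | nil => intro _ h; simp at h
  | cons y t ih =>
      intro hnd hx
      simp only [List.map_cons, List.sum_cons]
      by_cases hy : y = x
      · have hxt : x ∉ t := hy ▸ (List.nodup_cons.mp hnd).1
        have hz : (t.map (fun a => if a = x then f a else 0)).sum = 0 := by
          rw [List.sum_eq_zero]
          intro v hv
          obtain ⟨a, ha, rfl⟩ := List.mem_map.mp hv
          simp only [ite_eq_right_iff]
          exact fun h => absurd (h ▸ ha) hxt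
        simp [hz, hy]
      · have hxt : x ∈ t := by
          rcases List.mem_cons.mp hx with h | h
          · exact absurd h.symm hy
          · exact h
        rw [ih (List.nodup_cons.mp hnd).2 hxt]
        simp [hy]

theorem sum_count_mul (f : String → Int) :
    ∀ (l s : List String), s.Nodup → (∀ a ∈ l, a ∈ s) →
      (s.map (fun a => (l.count a : Int) * f a)).sum = (l.map f).sum := by
  intro l
  induction l with
  | nil => intro s _ _; simp
  | cons x t ih =>
      intro s hnd hsub
      have hx : x ∈ s := hsub x (List.mem_cons_self ..)
      have hsplit : s.map (fun a => ((x :: t).count a : Int) * f a)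
          = s.map (fun a => (t.count a : Int) * f a + (if a = x then f a else 0)) := by
        apply List.map_congr_left
        intro a _
        rw [List.count_cons]
        by_cases hax : a = x
        · simp [hax]; ring
        · simp [hax]; exact Or.inl fun h => hax h.symm
      rw [hsplit, PySem.List.sum_map_add_int, ih s hnd (fun a ha => hsub a (List.mem_cons_of_mem _ ha)),
          sum_ite_single f x s hnd hx]
      simp [add_comm]

-- for a duplicate-free list, the membership indicator is the count
theorem ite_contains_eq_mul_count (l : List String) (hl : l.Nodup) (k : String) (c : Int) :
    (if l.contains k then c else 0) = c * (l.count k : Int) := by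
  by_cases h : k ∈ l
  · rw [if_pos (by simpa using h), List.count_eq_one_of_mem hl h]; simp
  · rw [if_neg (by simpa using h), List.count_eq_zero.mpr h]; simp

-- value of A's whole loop at a key
theorem A_getD (k : String) (td : List (List (String × List String))) :
    ∀ (d : PySem.Dict String Int),
      (td.foldl (fun d p =>
          ((PySem.Dict.mk p).getD "types" []).foldl (fun d atk =>
              ((PySem.Dict.mk typeChart).getD atk []).foldl (fun d q =>
                  if 4 ≤ q.2 then d.modify q.1 0 (· + 1) else d) d) d) d).getD k 0
        = d.getD k 0 + ((pvFlat td).map (fun atk => ((pvSup atk).count k : Int))).sum := by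
  have inner : ∀ (ts : List String) (d : PySem.Dict String Int),
      (ts.foldl (fun d atk =>
          ((PySem.Dict.mk typeChart).getD atk []).foldl (fun d q =>
              if 4 ≤ q.2 then d.modify q.1 0 (· + 1) else d) d) d).getD k 0
        = d.getD k 0 + (ts.map (fun atk => ((pvSup atk).count k : Int))).sum := by
    intro ts
    induction ts with
    | nil => intro d; simp
    | cons atk t ih =>
        intro d
        simp only [List.foldl_cons, List.map_cons, List.sum_cons]
        rw [ih, foldA_getD k]
        have : ((((PySem.Dict.mk typeChart).getD atk []).filter (fun q => 4 ≤ q.2)).map (·.1)).count k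
            = (pvSup atk).count k := by rw [pvSup_eq]
        rw [this]; ring
  intro d
  induction td generalizing d with
  | nil => simp [pvFlat]
  | cons p t ih =>
      simp only [List.foldl_cons]
      rw [ih, inner]
      simp [pvFlat, List.flatMap_cons, add_assoc]

-- keys of A's whole loop
theorem A_keys (td : List (List (String × List String))) :
    ∀ (d : PySem.Dict String Int), d.keys = typeChart.map (·.1) →
      (td.foldl (fun d p =>
          ((PySem.Dict.mk p).getD "types" []).foldl (fun d atk =>
              ((PySem.Dict.mk typeChart).getD atk []).foldl (fun d q =>
                  if 4 ≤ q.2 then d.modify q.1 0 (· + 1) else d) d) d) d).keys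
        = typeChart.map (·.1) := by
  have hcont : ∀ (d : PySem.Dict String Int), d.keys = typeChart.map (·.1) →
      ∀ (atk : String) (q : String × Int), q ∈ (PySem.Dict.mk typeChart).getD atk [] → 4 ≤ q.2 →
        d.contains q.1 = true := by
    intro d hd atk q hq h4
    have hk : q.1 ∈ pvSup atk := by
      rw [pvSup_eq]
      exact List.mem_map.mpr ⟨q, List.mem_filter.mpr ⟨hq, by simpa using h4⟩, rfl⟩
    have := sup_sub_keys atk q.1 hk
    rw [PySem.Dict.contains_eq_decide_mem_keys, hd]
    simpa using this
  have inner : ∀ (ts : List String) (d : PySem.Dict String Int), d.keys = typeChart.map (·.1) →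
      (ts.foldl (fun d atk =>
          ((PySem.Dict.mk typeChart).getD atk []).foldl (fun d q =>
              if 4 ≤ q.2 then d.modify q.1 0 (· + 1) else d) d) d).keys = typeChart.map (·.1) := by
    intro ts
    induction ts with
    | nil => intro d hd; exact hd
    | cons atk t ih =>
        intro d hd
        simp only [List.foldl_cons]
        exact ih _ (by rw [foldA_keys _ d (fun q hq h4 => hcont d hd atk q hq h4)]; exact hd)
  intro d hd
  induction td generalizing d with
  | nil => exact hd
  | cons p t ih =>
      simp only [List.foldl_cons]
      exact ih _ (inner _ d hd)

theorem hit0_keys : (PySem.Dict.ofList (typeChart.map (fun t => (t.1, (0 : Int))))).keys = typeChart.map (·.1) := by decide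

theorem hit0_nodup : (typeChart.map (·.1)).Nodup := by decide

theorem allTypes_eq : allTypes = typeChart.map (·.1) := by decide

-- ===== VERDICT (by name: the statement is the Claim_ definition above) =====
theorem calculate_offensive_coverage_spec : Claim_equal_calculate_offensive_coverage := by
  unfold Claim_equal_calculate_offensive_coverage
  intro td _ _
  unfold Spec_calculate_offensive_coverage
  unfold calculate_offensive_coverage calculate_offensive_coverage_alt
  simp only []
  set hit0 : PySem.Dict String Int := PySem.Dict.ofList (typeChart.map (fun t => (t.1, 0))) with hhit0
  set dA := td.foldl (fun d p =>
      ((PySem.Dict.mk p).getD "types" []).foldl (fun d atk =>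
          ((PySem.Dict.mk typeChart).getD atk []).foldl (fun d q =>
              if 4 ≤ q.2 then d.modify q.1 0 (· + 1) else d) d) d) hit0 with hdA
  set counts : PySem.Dict String Int := td.foldl (fun d p =>
      ((PySem.Dict.mk p).getD "types" []).foldl (fun d t => d.insert t (d.getD t 0 + 1)) d)
      PySem.Dict.empty with hcounts
  -- counts is Counter(flat)
  have hcounter : counts = PySem.Dict.counter (pvFlat td) := by
    rw [hcounts, foldl_nested (fun d t => PySem.Dict.insert d t (PySem.Dict.getD d t 0 + 1))
          (fun p => (PySem.Dict.mk p).getD "types" []) td PySem.Dict.empty]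
    rw [← PySem.Dict.foldl_insert_getD_add_one_eq_counter]
    rfl
  have hAk : dA.keys = typeChart.map (·.1) := A_keys td hit0 hit0_keys
  -- A's items as a map over the chart's key list
  rw [PySem.Dict.items_eq_map_keys dA (hAk ▸ hit0_nodup) 0, hAk, ← allTypes_eq]
  apply List.map_congr_left
  intro k _
  -- pointwise: A's tally at k equals B's sum for k
  have hB : (counts.items.map (fun ac =>
        if ((PySem.Dict.mk superChart).getD ac.1 []).contains k then ac.2 else 0)).sum
      = ((pvFlat td).map (fun atk => ((pvSup atk).count k : Int))).sum := by
    have hstep : counts.items.map (fun ac =>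
          if ((PySem.Dict.mk superChart).getD ac.1 []).contains k then ac.2 else 0)
        = counts.items.map (fun ac => ac.2 * ((pvSup ac.1).count k : Int)) := by
      apply List.map_congr_left
      intro ac _
      exact ite_contains_eq_mul_count (pvSup ac.1) (pvSup_nodup ac.1) k ac.2
    rw [hstep, hcounter, PySem.Dict.items_counter, List.map_map]
    exact sum_count_mul (fun a => ((pvSup a).count k : Int)) (pvFlat td)
      (PySem.Set.ofList (pvFlat td)) (PySem.Set.nodup_ofList _)
      (fun a ha => (PySem.Set.mem_ofList _ _).mpr ha)
  rw [hdA, A_getD k td hit0, hB]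
  have h0 : hit0.getD k 0 = 0 := by
    have hmk : hit0 = PySem.Dict.mk (typeChart.map (fun t => (t.1, (0:Int)))) := by
      rw [hhit0]; decide
    rw [hmk, PySem.Dict.getD_eq_get?_getD,
        get?_mk_map_snd (fun _ : List (String × Int) => (0:Int)) typeChart k]
    cases (PySem.Dict.mk typeChart).get? k <;> simp
  rw [h0, zero_add]
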